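-- pv_equiv track=rewrite | github.com/5zjk5/prompt-engineering | Agent/data_analysic_agent/workflow/analysis_dimension.py | _find_similar_column
-- ===== SOURCE A (Python) =====
-- from typing import Dict, List, Optional, Union, Any
--
-- def _find_similar_column(target: str, available_columns: List[str]) -> Optional[str]:
--     """查找与目标列名最相似的列"""
--     if not target or not isinstance(target, str):
--         return None
--
--     # 1. 精确匹配（忽略大小写）
--     for col in available_columns:
--         if str(col).lower() == target.lower():
--             return col
--
--     # 2. 包含匹配
--     contained_matches = [col for col in available_columns
--                          if target.lower() in str(col).lower() or str(col).lower() in target.lower()]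
--     if contained_matches:
--         return contained_matches[0]
--
--     # 3. 简单相似度匹配
--     max_similarity = 0
--     best_match = None
--     for col in available_columns:
--         # 计算简单相似度（共同字符比例）
--         common_chars = set(str(col).lower()) & set(target.lower())
--         similarity = len(common_chars) / max(len(set(str(col).lower())), len(set(target.lower())))
--         if similarity > max_similarity and similarity > 0.5:  # 相似度阈值
--             max_similarity = similarity
--             best_match = col
--
--     return best_match
-- ===== SOURCE B (Python) =====
-- def _find_similar_column(target, available_columns):
--     """Single pass over available_columns; similarity kept as an exact integer
--     fraction (num, den) compared by cross-multiplication instead of floats."""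
--     if not target or not isinstance(target, str):
--         return None
--     t = target.lower()
--     tset = set(t)
--     contained = None
--     best = None
--     bn, bd = 0, 1  # best similarity so far, as the exact fraction bn/bd
--     for col in available_columns:
--         c = str(col).lower()
--         if c == t:
--             return col  # first exact match wins immediately
--         if contained is None and (t in c or c in t):
--             contained = col
--         cset = set(c)
--         num = len(cset & tset)
--         den = max(len(cset), len(tset))
--         # num/den > bn/bd  and  num/den > 1/2, exactly
--         if bn * den < num * bd and den < 2 * num:
--             bn, bd = num, den
--             best = col
--     if contained is not None:
--         return contained
--     return best
-- ===== Notes on version B (the rewrite author's own statement) =====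
-- stated objective: faster
-- what changed: Three separate scans (exact match, containment comprehension, float-similarity max loop) become one single pass with an early exact-match return, a first-containment slot, and the best similarity tracked as an exact integer fraction compared by cross-multiplication; target's lowercase string and character set are computed once instead of per column per pass.
import Mathlib
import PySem

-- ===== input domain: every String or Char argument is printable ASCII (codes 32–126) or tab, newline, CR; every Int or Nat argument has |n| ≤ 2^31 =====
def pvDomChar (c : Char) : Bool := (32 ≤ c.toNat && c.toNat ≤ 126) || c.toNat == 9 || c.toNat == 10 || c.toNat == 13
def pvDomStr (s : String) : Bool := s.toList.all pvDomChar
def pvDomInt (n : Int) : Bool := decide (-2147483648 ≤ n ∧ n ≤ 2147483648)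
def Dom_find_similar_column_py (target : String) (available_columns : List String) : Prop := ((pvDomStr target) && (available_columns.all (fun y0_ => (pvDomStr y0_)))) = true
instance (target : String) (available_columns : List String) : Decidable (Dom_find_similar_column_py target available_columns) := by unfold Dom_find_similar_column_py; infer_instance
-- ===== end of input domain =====

-- B replaces A's three scans by one pass with an early exact-match return, a first-containment
-- slot, and the best similarity tracked as an exact integer fraction (alternative decomposition).
-- Python's float similarity `len(common)/max(...)` is ported on both sides as the exact fraction
-- compared by cross-multiplication: the fractions involved have numerator ≤ denominator ≤ 100
-- (distinct lowercased ASCII chars), any two distinct such rationals differ by ≥ 1/10000, far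
-- above double rounding error, and IEEE division is correctly rounded and monotone, so the float
-- comparisons `>` against a stored similarity and against 0.5 coincide with the rational ones.

-- ===== PORT A =====
-- A's stage-3 loop step: state (max_num, max_den, best_match), similarity as exact fraction
def pvAStep (tl : List Char) (st : Nat × Nat × Option String) (col : String) : Nat × Nat × Option String :=
  let cset := PySem.Set.ofList (PySem.Chars.lower col.toList)
  let tset := PySem.Set.ofList tl
  let num := (PySem.Set.inter cset tset).length
  let den := max cset.length tset.length
  if st.1 * den < num * st.2.1 ∧ den < 2 * num then (num, den, some col) else st

def find_similar_column_py (target : String) (available_columns : List String) : Option String :=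
  if target.toList = [] then none
  else
    -- 1. exact match (case-insensitive), first hit returned
    match available_columns.find? (fun col => PySem.Chars.lower col.toList == PySem.Chars.lower target.toList) with
    | some col => some col
    | none =>
      -- 2. containment matches (comprehension), first element returned if any
      match available_columns.filter (fun col =>
          PySem.Chars.isIn (PySem.Chars.lower target.toList) (PySem.Chars.lower col.toList) ||
          PySem.Chars.isIn (PySem.Chars.lower col.toList) (PySem.Chars.lower target.toList)) with
      | c :: _ => some c
      | [] =>
        -- 3. similarity loop
        (available_columns.foldl (pvAStep (PySem.Chars.lower target.toList)) (0, 1, none)).2.2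

-- ===== PORT B =====
-- B's single loop: early return on exact, record first containment, track best similarity fraction
def pvBLoop (t : List Char) (cols : List String) (contained : Option String)
    (bn bd : Nat) (best : Option String) : Option String :=
  match cols with
  | [] => match contained with
          | some c => some c
          | none => best
  | col :: rest =>
    let c := PySem.Chars.lower col.toList
    if c = t then some col
    else
      let contained' := match contained with
        | some _ => contained
        | none => if PySem.Chars.isIn t c || PySem.Chars.isIn c t then some col else none
      let cset := PySem.Set.ofList c
      let tset := PySem.Set.ofList t
      let num := (PySem.Set.inter cset tset).length
      let den := max cset.length tset.length
      if bn * den < num * bd ∧ den < 2 * num then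
        pvBLoop t rest contained' num den (some col)
      else
        pvBLoop t rest contained' bn bd best

def find_similar_column_py_alt (target : String) (available_columns : List String) : Option String :=
  if target.toList = [] then none
  else pvBLoop (PySem.Chars.lower target.toList) available_columns none 0 1 none

-- ===== PRECONDITION & SPEC =====
def Spec_find_similar_column_py (target : String) (available_columns : List String) (out : Option String) : Prop := out = find_similar_column_py_alt target available_columns
instance (target : String) (available_columns : List String) (out : Option String) : Decidable (Spec_find_similar_column_py target available_columns out) := by unfold Spec_find_similar_column_py; infer_instance

-- ===== CLAIM (what is proved, stated in full; the proofs are below) =====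
def Claim_equal_find_similar_column_py : Prop := ∀ (target : String) (available_columns : List String), Dom_find_similar_column_py target available_columns → Spec_find_similar_column_py target available_columns (find_similar_column_py target available_columns)

-- ===== LEMMAS AND PROOFS =====

-- the first element of a filtered list is the first satisfying element
theorem pv_head?_filter {α : Type} (p : α → Bool) (l : List α) :
    (l.filter p).head? = l.find? p := by
  induction l with
  | nil => rfl
  | cons x xs ih => by_cases h : p x <;> simp [h, ih]

-- A's stage-3 step written out (definitional restatement used to rewrite the fold accumulator)
theorem pvAStep_eq (t : List Char) (bn bd : Nat) (best : Option String) (col : String) :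
    pvAStep t (bn, bd, best) col =
      if bn * (max (PySem.Set.ofList (PySem.Chars.lower col.toList)).length (PySem.Set.ofList t).length) <
            (PySem.Set.inter (PySem.Set.ofList (PySem.Chars.lower col.toList)) (PySem.Set.ofList t)).length * bd ∧
          (max (PySem.Set.ofList (PySem.Chars.lower col.toList)).length (PySem.Set.ofList t).length) <
            2 * (PySem.Set.inter (PySem.Set.ofList (PySem.Chars.lower col.toList)) (PySem.Set.ofList t)).length
      then ((PySem.Set.inter (PySem.Set.ofList (PySem.Chars.lower col.toList)) (PySem.Set.ofList t)).length,
            max (PySem.Set.ofList (PySem.Chars.lower col.toList)).length (PySem.Set.ofList t).length, some col)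
      else (bn, bd, best) := rfl

-- main invariant: pvBLoop equals A's staged result, for any accumulator state
theorem pvBLoop_eq (t : List Char) (cols : List String) (contained : Option String)
    (bn bd : Nat) (best : Option String) :
    pvBLoop t cols contained bn bd best =
      match cols.find? (fun col => PySem.Chars.lower col.toList == t) with
      | some col => some col
      | none =>
        match contained with
        | some c => some c
        | none =>
          match cols.find? (fun col =>
              PySem.Chars.isIn t (PySem.Chars.lower col.toList) ||
              PySem.Chars.isIn (PySem.Chars.lower col.toList) t) with
          | some c => some c
          | none => (cols.foldl (pvAStep t) (bn, bd, best)).2.2 := by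
  induction cols generalizing contained bn bd best with
  | nil => cases contained <;> rfl
  | cons col rest ih =>
    by_cases hx : PySem.Chars.lower col.toList = t
    · simp [pvBLoop, hx]
    · have hx' : (PySem.Chars.lower col.toList == t) = false := by simp [hx]
      rw [pvBLoop.eq_def]
      simp only [hx, if_false, List.find?_cons, hx', List.foldl_cons]
      rw [pvAStep_eq]
      cases contained with
      | some c0 => split_ifs <;> rw [ih]
      | none =>
        by_cases hc : (PySem.Chars.isIn t (PySem.Chars.lower col.toList) ||
            PySem.Chars.isIn (PySem.Chars.lower col.toList) t) = true
        · simp only [hc, if_true]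
          split_ifs <;> rw [ih]
        · have hc' : (PySem.Chars.isIn t (PySem.Chars.lower col.toList) ||
              PySem.Chars.isIn (PySem.Chars.lower col.toList) t) = false := by simpa using hc
          simp only [hc', Bool.false_eq_true, if_false]
          split_ifs <;> rw [ih]

-- ===== VERDICT (by name: the statement is the Claim_ definition above) =====
theorem find_similar_column_py_spec : Claim_equal_find_similar_column_py := by
  intro target cols _
  unfold Spec_find_similar_column_py find_similar_column_py find_similar_column_py_alt
  by_cases h : target.toList = []
  · simp [h]
  · rw [if_neg h, if_neg h, pvBLoop_eq]
    cases he : cols.find? (fun col => PySem.Chars.lower col.toList == PySem.Chars.lower target.toList) with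
    | some c => simp
    | none =>
      rw [← pv_head?_filter]
      cases hfl : cols.filter (fun col =>
          PySem.Chars.isIn (PySem.Chars.lower target.toList) (PySem.Chars.lower col.toList) ||
          PySem.Chars.isIn (PySem.Chars.lower col.toList) (PySem.Chars.lower target.toList)) <;>
        simp
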